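-- pv_equiv track=rewrite | github.com/MrBrantCode/unitest_baseline | mut_generate/mist_train_taco/taco_79/solution.py | can_schedule_lessons
-- ===== SOURCE A (Python) =====
-- from itertools import combinations
--
-- def can_schedule_lessons(t, test_cases):
--     results = []
--
--     for test_case in test_cases:
--         n = len(test_case)
--         mat = test_case
--         sets = []
--
--         for j in range(5):
--             temp = set()
--             for i in range(n):
--                 if mat[i][j] == 1:
--                     temp.add(i)
--             if len(temp) >= n / 2:
--                 sets.append(temp)
--
--         if len(sets) < 2:
--             results.append('NO')
--             continue
--
--         combs = combinations(sets, 2)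
--         found = False
--         for comb in combs:
--             if len(comb[0] | comb[1]) == n:
--                 results.append('YES')
--                 found = True
--                 break
--
--         if not found:
--             results.append('NO')
--
--     return results
-- ===== SOURCE B (Python) =====
-- PAIRS = [(0, 1), (0, 2), (0, 3), (0, 4), (1, 2), (1, 3), (1, 4), (2, 3), (2, 4), (3, 4)]
--
-- def can_schedule_lessons(t, test_cases):
--     results = []
--     for mat in test_cases:
--         n = len(mat)
--         counts = [0, 0, 0, 0, 0]
--         alive = [True] * 10  # alive[k]: every row seen so far has a 1 in a column of PAIRS[k]
--         for row in mat:
--             counts = [c + (1 if row[j] == 1 else 0) for j, c in enumerate(counts)]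
--             alive = [ok and (row[a] == 1 or row[b] == 1) for ok, (a, b) in zip(alive, PAIRS)]
--         # count >= n/2 (Python float division) is exactly 2*count >= n for ints of this size
--         results.append('YES' if any(ok and 2 * counts[a] >= n and 2 * counts[b] >= n
--                                     for ok, (a, b) in zip(alive, PAIRS)) else 'NO')
--     return results
-- ===== Notes on version B (the rewrite author's own statement) =====
-- stated objective: alternative
-- what changed: B makes one row-major pass per matrix, maintaining five column counts and a per-pair coverage flag for each of the 10 fixed column pairs, then reads the answer off that constant-size state; A is column-major: it materialises per-column row-index sets, filters them, and then tests set unions pair by pair.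
import Mathlib
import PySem

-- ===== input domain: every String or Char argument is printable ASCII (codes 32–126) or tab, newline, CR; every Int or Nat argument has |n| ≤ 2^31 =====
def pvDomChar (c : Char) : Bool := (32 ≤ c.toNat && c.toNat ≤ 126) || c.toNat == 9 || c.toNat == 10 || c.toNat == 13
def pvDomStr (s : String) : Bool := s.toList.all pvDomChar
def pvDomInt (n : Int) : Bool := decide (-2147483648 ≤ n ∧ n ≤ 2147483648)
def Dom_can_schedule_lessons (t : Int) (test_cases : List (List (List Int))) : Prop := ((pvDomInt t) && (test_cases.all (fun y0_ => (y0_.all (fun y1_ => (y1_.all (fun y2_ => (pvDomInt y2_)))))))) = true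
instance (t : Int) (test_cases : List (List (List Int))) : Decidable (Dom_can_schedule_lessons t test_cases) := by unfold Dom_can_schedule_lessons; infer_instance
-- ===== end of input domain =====

-- B replaces A's column-major index-set construction and pairwise set unions by a single row-major
-- pass keeping five column counts and a coverage flag per fixed column pair (objective: alternative).

-- ===== PORT A =====
-- 'len(temp) >= n / 2' is ported as '2 * len(temp) ≥ n': exact, since Python's float halves of
-- integers of this magnitude are exact and the comparison has the same truth value.
def can_schedule_lessons (t : Int) (test_cases : List (List (List Int))) : List String :=
  test_cases.foldl (fun results test_case =>
    let n : Int := test_case.length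
    let mat := test_case
    let sets : List (PySem.Set Int) :=
      (PySem.List.pyRange 0 5 1).foldl (fun sets j =>
        let temp : PySem.Set Int :=
          (PySem.List.pyRange 0 n 1).foldl (fun temp i =>
            if PySem.List.pyGetD (PySem.List.pyGetD mat i []) j 0 == 1 then PySem.Set.add temp i
            else temp) PySem.Set.empty
        if 2 * (temp.length : Int) ≥ n then sets ++ [temp] else sets) []
    if sets.length < 2 then results ++ ["NO"]
    else
      let combs := PySem.List.combinations sets 2
      if combs.any (fun comb =>
          ((PySem.Set.union (PySem.List.pyGetD comb 0 []) (PySem.List.pyGetD comb 1 [])).length : Int) == n)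
      then results ++ ["YES"] else results ++ ["NO"]) []

-- ===== PORT B =====
-- PAIRS: the 10 unordered column pairs, a module-level literal in Source B
def pvPAIRS : List (Int × Int) :=
  [(0,1),(0,2),(0,3),(0,4),(1,2),(1,3),(1,4),(2,3),(2,4),(3,4)]

def can_schedule_lessons_alt (t : Int) (test_cases : List (List (List Int))) : List String :=
  test_cases.map (fun mat =>
    let n : Int := mat.length
    let st :=
      mat.foldl (fun (st : List Int × List Bool) row =>
        ((PySem.List.enumerate st.1).map
            (fun jc => jc.2 + (if PySem.List.pyGetD row jc.1 0 == 1 then 1 else 0)),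
         (st.2.zip pvPAIRS).map
            (fun x => x.1 && (PySem.List.pyGetD row x.2.1 0 == 1 || PySem.List.pyGetD row x.2.2 0 == 1))))
        ([0,0,0,0,0], [true,true,true,true,true,true,true,true,true,true])
    if (st.2.zip pvPAIRS).any (fun x =>
        x.1 && decide (2 * PySem.List.pyGetD st.1 x.2.1 0 ≥ n)
            && decide (2 * PySem.List.pyGetD st.1 x.2.2 0 ≥ n))
    then "YES" else "NO")

-- ===== PRECONDITION & SPEC =====
-- Pre_ excludes exactly the inputs where A raises IndexError: some row shorter than 5 entries
-- (A indexes mat[i][j] for every j in range(5)).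
def Pre_can_schedule_lessons (t : Int) (test_cases : List (List (List Int))) : Prop :=
  ∀ tc ∈ test_cases, ∀ row ∈ tc, 5 ≤ row.length
instance (t : Int) (test_cases : List (List (List Int))) : Decidable (Pre_can_schedule_lessons t test_cases) := by unfold Pre_can_schedule_lessons; infer_instance

def pvWitness_can_schedule_lessons : Int × List (List (List Int)) :=
  (1, [[[1, 1, 0, 0, 0], [0, 1, 0, 0, 1]], [[1, 0, 0, 0, 0], [0, 1, 0, 0, 0]]])

def Spec_can_schedule_lessons (t : Int) (test_cases : List (List (List Int))) (out : List String) : Prop := out = can_schedule_lessons_alt t test_cases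
instance (t : Int) (test_cases : List (List (List Int))) (out : List String) : Decidable (Spec_can_schedule_lessons t test_cases out) := by unfold Spec_can_schedule_lessons; infer_instance

-- ===== CLAIM (what is proved, stated in full; the proofs are below) =====
def Claim_equal_can_schedule_lessons : Prop := ∀ (t : Int) (test_cases : List (List (List Int))), Dom_can_schedule_lessons t test_cases → Pre_can_schedule_lessons t test_cases → Spec_can_schedule_lessons t test_cases (can_schedule_lessons t test_cases)

-- ===== LEMMAS AND PROOFS =====

def pvCountOnes (mat : List (List Int)) (j : Int) : Nat :=
  mat.countP (fun row => PySem.List.pyGetD row j 0 == 1)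

def pvCovered (mat : List (List Int)) (ca cb : Int) : Bool :=
  mat.all (fun row => PySem.List.pyGetD row ca 0 == 1 || PySem.List.pyGetD row cb 0 == 1)

def pvPairAny {α : Type} (g : α → α → Bool) : List α → Bool
  | [] => false
  | c :: rest => rest.any (g c) || pvPairAny g rest

-- ordered-pair any over a filtered list, fused
def pvPQ {α : Type} (q : α → Bool) (P : α → α → Bool) : List α → Bool
  | [] => false
  | x :: r => (q x && r.any (fun y => q y && P x y)) || pvPQ q P r

-- the per-test-case value computed by A's loop body
def pvACase (mat : List (List Int)) : String :=
  let n : Int := mat.length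
  let sets : List (PySem.Set Int) :=
    (PySem.List.pyRange 0 5 1).foldl (fun sets j =>
      let temp : PySem.Set Int :=
        (PySem.List.pyRange 0 n 1).foldl (fun temp i =>
          if PySem.List.pyGetD (PySem.List.pyGetD mat i []) j 0 == 1 then PySem.Set.add temp i
          else temp) PySem.Set.empty
      if 2 * (temp.length : Int) ≥ n then sets ++ [temp] else sets) []
  if sets.length < 2 then "NO"
  else
    let combs := PySem.List.combinations sets 2
    if combs.any (fun comb =>
        ((PySem.Set.union (PySem.List.pyGetD comb 0 []) (PySem.List.pyGetD comb 1 [])).length : Int) == n)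
    then "YES" else "NO"

-- the per-test-case value computed by B's map body
def pvBCase (mat : List (List Int)) : String :=
  let n : Int := mat.length
  let st :=
    mat.foldl (fun (st : List Int × List Bool) row =>
      ((PySem.List.enumerate st.1).map
          (fun jc => jc.2 + (if PySem.List.pyGetD row jc.1 0 == 1 then 1 else 0)),
       (st.2.zip pvPAIRS).map
          (fun x => x.1 && (PySem.List.pyGetD row x.2.1 0 == 1 || PySem.List.pyGetD row x.2.2 0 == 1))))
      ([0,0,0,0,0], [true,true,true,true,true,true,true,true,true,true])
  if (st.2.zip pvPAIRS).any (fun x =>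
      x.1 && decide (2 * PySem.List.pyGetD st.1 x.2.1 0 ≥ n)
          && decide (2 * PySem.List.pyGetD st.1 x.2.2 0 ≥ n))
  then "YES" else "NO"

def pvR (mat : List (List Int)) : List Int := PySem.List.pyRange 0 (mat.length : Int) 1
def pvPA (mat : List (List Int)) (j i : Int) : Bool :=
  PySem.List.pyGetD (PySem.List.pyGetD mat i []) j 0 == 1

lemma pvA_foldl (tcs : List (List (List Int))) (t : Int) :
    can_schedule_lessons t tcs = tcs.map pvACase := by
  show List.foldl _ [] tcs = _
  have h : ∀ (acc : List String), tcs.foldl (fun results test_case =>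
      let n : Int := test_case.length
      let mat := test_case
      let sets : List (PySem.Set Int) :=
        (PySem.List.pyRange 0 5 1).foldl (fun sets j =>
          let temp : PySem.Set Int :=
            (PySem.List.pyRange 0 n 1).foldl (fun temp i =>
              if PySem.List.pyGetD (PySem.List.pyGetD mat i []) j 0 == 1 then PySem.Set.add temp i
              else temp) PySem.Set.empty
          if 2 * (temp.length : Int) ≥ n then sets ++ [temp] else sets) []
      if sets.length < 2 then results ++ ["NO"]
      else
        let combs := PySem.List.combinations sets 2
        if combs.any (fun comb =>
            ((PySem.Set.union (PySem.List.pyGetD comb 0 []) (PySem.List.pyGetD comb 1 [])).length : Int) == n)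
        then results ++ ["YES"] else results ++ ["NO"]) acc = acc ++ tcs.map pvACase := by
    induction tcs with
    | nil => simp
    | cons tc rest ih =>
      intro acc
      simp only [List.foldl_cons, List.map_cons, ih]
      have : (let n : Int := tc.length
        let mat := tc
        let sets : List (PySem.Set Int) :=
          (PySem.List.pyRange 0 5 1).foldl (fun sets j =>
            let temp : PySem.Set Int :=
              (PySem.List.pyRange 0 n 1).foldl (fun temp i =>
                if PySem.List.pyGetD (PySem.List.pyGetD mat i []) j 0 == 1 then PySem.Set.add temp i
                else temp) PySem.Set.empty
            if 2 * (temp.length : Int) ≥ n then sets ++ [temp] else sets) []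
        if sets.length < 2 then acc ++ ["NO"]
        else
          let combs := PySem.List.combinations sets 2
          if combs.any (fun comb =>
              ((PySem.Set.union (PySem.List.pyGetD comb 0 []) (PySem.List.pyGetD comb 1 [])).length : Int) == n)
          then acc ++ ["YES"] else acc ++ ["NO"]) = acc ++ [pvACase tc] := by
        unfold pvACase
        dsimp only
        split_ifs <;> simp_all
      rw [this]
      simp
  simpa using h []

lemma pvB_map (tcs : List (List (List Int))) (t : Int) :
    can_schedule_lessons_alt t tcs = tcs.map pvBCase := by
  rfl

lemma pvTemp_eq (mat : List (List Int)) (j : Int) :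
    (PySem.List.pyRange 0 (mat.length : Int) 1).foldl (fun temp i =>
      if PySem.List.pyGetD (PySem.List.pyGetD mat i []) j 0 == 1 then PySem.Set.add temp i
      else temp) PySem.Set.empty = (pvR mat).filter (pvPA mat j) := by
  rw [PySem.List.foldl_if_eq_foldl_filter]
  show PySem.Set.ofList _ = _
  exact PySem.Set.ofList_eq_self_of_nodup _ (List.Nodup.filter _ (PySem.List.nodup_pyRange_one _ _))

lemma pvLen_temp (mat : List (List Int)) (j : Int) :
    ((pvR mat).filter (pvPA mat j)).length = pvCountOnes mat j := by
  rw [← List.countP_eq_length_filter]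
  unfold pvCountOnes
  conv_rhs => rw [← PySem.List.map_pyGetD_pyRange_zero' mat ([] : List Int)]
  rw [List.countP_map]
  rfl

lemma pvCovered_eq (mat : List (List Int)) (ca cb : Int) :
    pvCovered mat ca cb = (pvR mat).all (fun i => pvPA mat ca i || pvPA mat cb i) := by
  unfold pvCovered
  conv_lhs => rw [← PySem.List.map_pyGetD_pyRange_zero' mat ([] : List Int)]
  rw [List.all_map]
  rfl

lemma pvUnion_card (mat : List (List Int)) (ca cb : Int) :
    (((PySem.Set.union ((pvR mat).filter (pvPA mat ca)) ((pvR mat).filter (pvPA mat cb))).length : Int)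
      == (mat.length : Int)) = (pvR mat).all (fun i => pvPA mat ca i || pvPA mat cb i) := by
  have hRnd : (pvR mat).Nodup := PySem.List.nodup_pyRange_one _ _
  have hRlen : (pvR mat).length = mat.length := by
    simp [pvR, PySem.List.length_pyRange_one]
  have hUnd : (PySem.Set.union ((pvR mat).filter (pvPA mat ca)) ((pvR mat).filter (pvPA mat cb))).Nodup :=
    PySem.Set.nodup_union _ _ (List.Nodup.filter _ hRnd)
  have hUsub : (PySem.Set.union ((pvR mat).filter (pvPA mat ca)) ((pvR mat).filter (pvPA mat cb))) ⊆ pvR mat := by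
    intro x hx
    rcases (PySem.Set.mem_union _ _ _).1 hx with h1 | h1 <;>
      exact (List.mem_filter.1 h1).1
  rw [Bool.eq_iff_iff]
  constructor
  · intro h
    have hlen : (PySem.Set.union ((pvR mat).filter (pvPA mat ca)) ((pvR mat).filter (pvPA mat cb))).length
        = (pvR mat).length := by
      rw [hRlen]; exact_mod_cast beq_iff_eq.1 h
    have hperm := (List.Nodup.subperm hUnd hUsub).perm_of_length_le (by omega)
    rw [List.all_eq_true]
    intro i hi
    have hiU := hperm.mem_iff.2 hi
    rcases (PySem.Set.mem_union _ _ _).1 hiU with h1 | h1 <;>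
      simp only [List.mem_filter] at h1 <;> simp [h1.2]
  · intro h
    have hsub2 : pvR mat ⊆ (PySem.Set.union ((pvR mat).filter (pvPA mat ca)) ((pvR mat).filter (pvPA mat cb))) := by
      intro i hi
      have hb := List.all_eq_true.1 h i hi
      apply (PySem.Set.mem_union _ _ _).2
      rw [Bool.or_eq_true] at hb
      rcases hb with h1 | h1
      · exact Or.inl (List.mem_filter.2 ⟨hi, h1⟩)
      · exact Or.inr (List.mem_filter.2 ⟨hi, h1⟩)
    have hperm : List.Perm (PySem.Set.union ((pvR mat).filter (pvPA mat ca)) ((pvR mat).filter (pvPA mat cb))) (pvR mat) :=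
      (List.perm_ext_iff_of_nodup hUnd hRnd).2 (fun a => ⟨fun hx => hUsub hx, fun hx => hsub2 hx⟩)
    rw [beq_iff_eq]
    exact_mod_cast hperm.length_eq.trans hRlen

lemma pvComb_any {α : Type} (d : α) (P : α → α → Bool) (xs : List α) :
    (PySem.List.combinations xs 2).any (fun c =>
      P (PySem.List.pyGetD c 0 d) (PySem.List.pyGetD c 1 d)) = pvPairAny P xs := by
  induction xs with
  | nil => rfl
  | cons x rest ih =>
    rw [PySem.List.combinations_cons_succ, PySem.List.combinations_one]
    simp only [List.any_append, List.any_map, ih]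
    simp [pvPairAny, PySem.List.pyGetD, PySem.List.pyGet?, PySem.List.pyIdx?, Function.comp_def]

lemma pvPairAny_map {α β : Type} (F : α → β) (P : β → β → Bool) (xs : List α) :
    pvPairAny P (xs.map F) = pvPairAny (fun a b => P (F a) (F b)) xs := by
  induction xs with
  | nil => rfl
  | cons x rest ih => simp [pvPairAny, List.any_map, ih, Function.comp_def]

lemma pvComb_any' (n : Int) (xs : List (PySem.Set Int)) :
    (PySem.List.combinations xs 2).any (fun comb =>
      ((PySem.Set.union (PySem.List.pyGetD comb 0 []) (PySem.List.pyGetD comb 1 [])).length : Int) == n)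
      = pvPairAny (fun a b => ((PySem.Set.union a b).length : Int) == n) xs :=
  pvComb_any ([] : PySem.Set Int) (fun a b => ((PySem.Set.union a b).length : Int) == n) xs

lemma pvPairAny_filter {α : Type} (q : α → Bool) (P : α → α → Bool) (xs : List α) :
    pvPairAny P (xs.filter q) = pvPQ q P xs := by
  induction xs with
  | nil => rfl
  | cons x rest ih =>
    by_cases h : q x = true
    · simp [h, pvPairAny, pvPQ, ih, List.any_filter]
    · simp [h, pvPQ, ih]

-- A-side characterisation: qualifying-column filter fused into an ordered-pair scan
lemma pvACase_char (mat : List (List Int)) :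
    pvACase mat = (let n : Int := mat.length
      if pvPQ (fun j => decide (2 * ((pvCountOnes mat j : Int)) ≥ n))
              (fun ca cb => pvCovered mat ca cb) [0, 1, 2, 3, 4] then "YES" else "NO") := by
  unfold pvACase
  dsimp only
  rw [show (fun (sets : List (PySem.Set Int)) (j : Int) =>
      let temp : PySem.Set Int :=
        (PySem.List.pyRange 0 (mat.length : Int) 1).foldl (fun temp i =>
          if PySem.List.pyGetD (PySem.List.pyGetD mat i []) j 0 == 1 then PySem.Set.add temp i
          else temp) PySem.Set.empty
      if 2 * (temp.length : Int) ≥ (mat.length : Int) then sets ++ [temp] else sets)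
    = (fun (sets : List (PySem.Set Int)) (j : Int) =>
      if 2 * (((pvR mat).filter (pvPA mat j)).length : Int) ≥ (mat.length : Int)
      then sets ++ [(pvR mat).filter (pvPA mat j)] else sets) from by
      funext sets j; rw [pvTemp_eq]]
  rw [PySem.List.foldl_append_ite]
  simp only [pvLen_temp, List.nil_append, List.length_map]
  rw [pvComb_any', pvPairAny_map]
  have hg : (fun a b => ((PySem.Set.union ((pvR mat).filter (pvPA mat a)) ((pvR mat).filter (pvPA mat b))).length : Int)
      == (mat.length : Int)) = (fun ca cb => pvCovered mat ca cb) := by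
    funext a b
    rw [pvUnion_card, pvCovered_eq]
  rw [hg]
  have hr : PySem.List.pyRange 0 5 1 = [0, 1, 2, 3, 4] := by decide
  rw [hr]
  rcases h : ([0,1,2,3,4] : List Int).filter (fun j => decide (2 * ((pvCountOnes mat j : Int)) ≥ (mat.length : Int))) with _ | ⟨a, _ | ⟨b, rest⟩⟩ <;>
    rw [← pvPairAny_filter, h] <;> simp [pvPairAny]

-- B-side loop invariant: the fold adds per-column one-counts and ands in per-pair coverage
set_option maxHeartbeats 2000000 in
lemma pvB_inv (mat : List (List Int)) (c0 c1 c2 c3 c4 : Int)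
    (b0 b1 b2 b3 b4 b5 b6 b7 b8 b9 : Bool) :
    mat.foldl (fun (st : List Int × List Bool) row =>
      ((PySem.List.enumerate st.1).map
          (fun jc => jc.2 + (if PySem.List.pyGetD row jc.1 0 == 1 then 1 else 0)),
       (st.2.zip pvPAIRS).map
          (fun x => x.1 && (PySem.List.pyGetD row x.2.1 0 == 1 || PySem.List.pyGetD row x.2.2 0 == 1))))
      ([c0,c1,c2,c3,c4], [b0,b1,b2,b3,b4,b5,b6,b7,b8,b9])
    = ([c0 + (pvCountOnes mat 0 : Int), c1 + (pvCountOnes mat 1 : Int),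
        c2 + (pvCountOnes mat 2 : Int), c3 + (pvCountOnes mat 3 : Int),
        c4 + (pvCountOnes mat 4 : Int)],
       [b0 && pvCovered mat 0 1, b1 && pvCovered mat 0 2, b2 && pvCovered mat 0 3,
        b3 && pvCovered mat 0 4, b4 && pvCovered mat 1 2, b5 && pvCovered mat 1 3,
        b6 && pvCovered mat 1 4, b7 && pvCovered mat 2 3, b8 && pvCovered mat 2 4,
        b9 && pvCovered mat 3 4]) := by
  induction mat generalizing c0 c1 c2 c3 c4 b0 b1 b2 b3 b4 b5 b6 b7 b8 b9 with
  | nil => simp [pvCountOnes, pvCovered]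
  | cons row rest ih =>
    rw [List.foldl_cons]
    have hstep : ((PySem.List.enumerate ([c0,c1,c2,c3,c4] : List Int)).map
          (fun jc => jc.2 + (if PySem.List.pyGetD row jc.1 0 == 1 then 1 else 0)),
       (([b0,b1,b2,b3,b4,b5,b6,b7,b8,b9] : List Bool).zip pvPAIRS).map
          (fun x => x.1 && (PySem.List.pyGetD row x.2.1 0 == 1 || PySem.List.pyGetD row x.2.2 0 == 1)))
      = (([c0 + (if PySem.List.pyGetD row 0 0 == 1 then 1 else 0),
           c1 + (if PySem.List.pyGetD row 1 0 == 1 then 1 else 0),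
           c2 + (if PySem.List.pyGetD row 2 0 == 1 then 1 else 0),
           c3 + (if PySem.List.pyGetD row 3 0 == 1 then 1 else 0),
           c4 + (if PySem.List.pyGetD row 4 0 == 1 then 1 else 0)] : List Int),
         ([b0 && (PySem.List.pyGetD row 0 0 == 1 || PySem.List.pyGetD row 1 0 == 1),
           b1 && (PySem.List.pyGetD row 0 0 == 1 || PySem.List.pyGetD row 2 0 == 1),
           b2 && (PySem.List.pyGetD row 0 0 == 1 || PySem.List.pyGetD row 3 0 == 1),
           b3 && (PySem.List.pyGetD row 0 0 == 1 || PySem.List.pyGetD row 4 0 == 1),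
           b4 && (PySem.List.pyGetD row 1 0 == 1 || PySem.List.pyGetD row 2 0 == 1),
           b5 && (PySem.List.pyGetD row 1 0 == 1 || PySem.List.pyGetD row 3 0 == 1),
           b6 && (PySem.List.pyGetD row 1 0 == 1 || PySem.List.pyGetD row 4 0 == 1),
           b7 && (PySem.List.pyGetD row 2 0 == 1 || PySem.List.pyGetD row 3 0 == 1),
           b8 && (PySem.List.pyGetD row 2 0 == 1 || PySem.List.pyGetD row 4 0 == 1),
           b9 && (PySem.List.pyGetD row 3 0 == 1 || PySem.List.pyGetD row 4 0 == 1)] : List Bool)) := by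
      simp [PySem.List.enumerate_cons, PySem.List.enumerate_nil, pvPAIRS, List.zip]
    rw [hstep, ih]
    simp only [pvCountOnes, List.countP_cons, pvCovered, List.all_cons, Prod.mk.injEq,
      List.cons.injEq, and_true]
    refine ⟨⟨?_, ?_, ?_, ?_, ?_⟩, ?_, ?_, ?_, ?_, ?_, ?_, ?_, ?_, ?_, ?_⟩ <;>
      first
        | (split_ifs <;> push_cast <;> omega)
        | rw [Bool.and_assoc]

set_option maxHeartbeats 2000000 in
lemma pvCase_eq (mat : List (List Int)) : pvACase mat = pvBCase mat := by
  rw [pvACase_char]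
  unfold pvBCase
  dsimp only
  rw [pvB_inv]
  simp [pvPQ, pvPAIRS, PySem.List.pyGetD, PySem.List.pyGet?, PySem.List.pyIdx?]
  refine if_congr ?_ rfl rfl
  constructor
  · rintro (⟨q0, (⟨q1, c⟩ | ⟨q2, c⟩ | ⟨q3, c⟩ | ⟨q4, c⟩)⟩ |
      ⟨q1, (⟨q2, c⟩ | ⟨q3, c⟩ | ⟨q4, c⟩)⟩ | ⟨q2, (⟨q3, c⟩ | ⟨q4, c⟩)⟩ | ⟨q3, q4, c⟩)
    exacts [Or.inl ⟨⟨c, q0⟩, q1⟩,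
      Or.inr (Or.inl ⟨⟨c, q0⟩, q2⟩),
      Or.inr (Or.inr (Or.inl ⟨⟨c, q0⟩, q3⟩)),
      Or.inr (Or.inr (Or.inr (Or.inl ⟨⟨c, q0⟩, q4⟩))),
      Or.inr (Or.inr (Or.inr (Or.inr (Or.inl ⟨⟨c, q1⟩, q2⟩)))),
      Or.inr (Or.inr (Or.inr (Or.inr (Or.inr (Or.inl ⟨⟨c, q1⟩, q3⟩))))),
      Or.inr (Or.inr (Or.inr (Or.inr (Or.inr (Or.inr (Or.inl ⟨⟨c, q1⟩, q4⟩)))))),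
      Or.inr (Or.inr (Or.inr (Or.inr (Or.inr (Or.inr (Or.inr (Or.inl ⟨⟨c, q2⟩, q3⟩))))))),
      Or.inr (Or.inr (Or.inr (Or.inr (Or.inr (Or.inr (Or.inr (Or.inr (Or.inl ⟨⟨c, q2⟩, q4⟩)))))))),
      Or.inr (Or.inr (Or.inr (Or.inr (Or.inr (Or.inr (Or.inr (Or.inr (Or.inr ⟨⟨c, q3⟩, q4⟩))))))))]
  · rintro (⟨⟨c, qa⟩, qb⟩ | ⟨⟨c, qa⟩, qb⟩ | ⟨⟨c, qa⟩, qb⟩ | ⟨⟨c, qa⟩, qb⟩ | ⟨⟨c, qa⟩, qb⟩ |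
      ⟨⟨c, qa⟩, qb⟩ | ⟨⟨c, qa⟩, qb⟩ | ⟨⟨c, qa⟩, qb⟩ | ⟨⟨c, qa⟩, qb⟩ | ⟨⟨c, qa⟩, qb⟩)
    exacts [Or.inl ⟨qa, Or.inl ⟨qb, c⟩⟩,
      Or.inl ⟨qa, Or.inr (Or.inl ⟨qb, c⟩)⟩,
      Or.inl ⟨qa, Or.inr (Or.inr (Or.inl ⟨qb, c⟩))⟩,
      Or.inl ⟨qa, Or.inr (Or.inr (Or.inr ⟨qb, c⟩))⟩,
      Or.inr (Or.inl ⟨qa, Or.inl ⟨qb, c⟩⟩),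
      Or.inr (Or.inl ⟨qa, Or.inr (Or.inl ⟨qb, c⟩)⟩),
      Or.inr (Or.inl ⟨qa, Or.inr (Or.inr ⟨qb, c⟩)⟩),
      Or.inr (Or.inr (Or.inl ⟨qa, Or.inl ⟨qb, c⟩⟩)),
      Or.inr (Or.inr (Or.inl ⟨qa, Or.inr ⟨qb, c⟩⟩)),
      Or.inr (Or.inr (Or.inr ⟨qa, qb, c⟩))]

-- ===== VERDICT (by name: the statement is the Claim_ definition above) =====
theorem can_schedule_lessons_spec : Claim_equal_can_schedule_lessons := by
  intro t tcs _ _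
  unfold Spec_can_schedule_lessons
  rw [pvA_foldl, pvB_map]
  exact List.map_congr_left (fun mat _ => pvCase_eq mat)
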